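-- pv_equiv track=rewrite | github.com/xupeng211/FootballPrediction | scripts/phase_g_week3_advanced_fixer.py | _fix_parenthesis_balance
-- ===== SOURCE A (Python) =====
-- def _fix_parenthesis_balance(line: str) -> str:
--     """修复圆括号平衡"""
--     open_count = line.count('(')
--     close_count = line.count(')')
--
--     if open_count > close_count:
--         # 缺少右括号
--         line = line + ')' * (open_count - close_count)
--     elif close_count > open_count:
--         # 多余右括号，移除多余的
--         excess = close_count - open_count
--         for _ in range(excess):
--             last_paren = line.rfind(')')
--             if last_paren != -1:
--                 line = line[:last_paren] + line[last_paren+1:]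
--
--     return line
-- ===== SOURCE B (Python) =====
-- def _fix_parenthesis_balance(line: str) -> str:
--     """Balance parentheses: append missing ')' or drop the rightmost excess ')' in one right-to-left pass."""
--     opens = line.count('(')
--     closes = line.count(')')
--     if opens > closes:
--         return line + ')' * (opens - closes)
--     if closes > opens:
--         skip = closes - opens
--         kept = []
--         for ch in reversed(line):
--             if skip and ch == ')':
--                 skip -= 1
--             else:
--                 kept.append(ch)
--         return ''.join(reversed(kept))
--     return line
-- ===== Notes on version B (the rewrite author's own statement) =====
-- stated objective: faster
-- what changed: Instead of repeatedly calling rfind and rebuilding the string once per excess close-paren, B removes the rightmost excess close-parens in a single right-to-left pass with a skip counter.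
import Mathlib
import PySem

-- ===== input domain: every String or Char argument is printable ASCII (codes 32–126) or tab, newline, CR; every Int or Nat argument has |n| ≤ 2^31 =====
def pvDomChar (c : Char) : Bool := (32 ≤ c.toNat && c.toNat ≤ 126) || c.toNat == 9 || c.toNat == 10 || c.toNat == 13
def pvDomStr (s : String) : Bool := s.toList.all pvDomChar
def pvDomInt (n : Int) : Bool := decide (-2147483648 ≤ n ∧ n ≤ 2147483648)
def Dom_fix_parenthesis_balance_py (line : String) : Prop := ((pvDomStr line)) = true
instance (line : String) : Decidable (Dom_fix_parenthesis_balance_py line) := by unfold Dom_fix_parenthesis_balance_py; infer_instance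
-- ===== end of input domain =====

-- B replaces A's per-excess rfind-and-rebuild loop by one right-to-left pass with a skip
-- counter that drops the rightmost excess close-parens (objective: faster, O(n*k) to O(n)).

-- ===== PORT A =====
-- one iteration of A's loop body: i = line.rfind(')'); if i != -1: line = line[:i] + line[i+1:]
def pvStepA (l : List Char) : List Char :=
  let i := PySem.Chars.rfind l [')']
  if i ≠ -1 then
    PySem.Chars.slice l none (some i) ++ PySem.Chars.slice l (some (i + 1)) none
  else l

def fix_parenthesis_balance_py (line : String) : String :=
  let cs := line.toList
  let open_count := PySem.Chars.count cs ['(']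
  let close_count := PySem.Chars.count cs [')']
  if open_count > close_count then
    String.ofList (cs ++ List.replicate (open_count - close_count) ')')
  else if close_count > open_count then
    String.ofList ((List.range (close_count - open_count)).foldl (fun l _ => pvStepA l) cs)
  else
    String.ofList cs

-- ===== PORT B =====
-- B's loop over reversed(line) with the mutable skip counter: 'if skip and ch == ")": skip -= 1 else: keep ch'
def pvRemK : Nat → List Char → List Char
  | _, [] => []
  | k, c :: t => if k ≠ 0 ∧ c = ')' then pvRemK (k - 1) t else c :: pvRemK k t

def fix_parenthesis_balance_py_alt (line : String) : String :=
  let cs := line.toList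
  let opens := PySem.Chars.count cs ['(']
  let closes := PySem.Chars.count cs [')']
  if opens > closes then
    String.ofList (cs ++ List.replicate (opens - closes) ')')
  else if closes > opens then
    String.ofList ((pvRemK (closes - opens) cs.reverse).reverse)
  else
    String.ofList cs

-- ===== PRECONDITION & SPEC =====
def Spec_fix_parenthesis_balance_py (line : String) (out : String) : Prop := out = fix_parenthesis_balance_py_alt line
instance (line : String) (out : String) : Decidable (Spec_fix_parenthesis_balance_py line out) := by unfold Spec_fix_parenthesis_balance_py; infer_instance

-- ===== CLAIM (what is proved, stated in full; the proofs are below) =====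
def Claim_equal_fix_parenthesis_balance_py : Prop := ∀ (line : String), Dom_fix_parenthesis_balance_py line → Spec_fix_parenthesis_balance_py line (fix_parenthesis_balance_py line)

-- ===== LEMMAS AND PROOFS =====

-- removing the first ')' (scanning left to right); pvStepA on the reverse is exactly this
def pvRem1 : List Char → List Char
  | [] => []
  | c :: t => if c = ')' then t else c :: pvRem1 t

theorem pvRemK_zero (l : List Char) : pvRemK 0 l = l := by
  induction l with
  | nil => rfl
  | cons c t ih => simp [pvRemK, ih]

theorem pvRemK_succ (k : Nat) (l : List Char) : pvRemK (k + 1) l = pvRem1 (pvRemK k l) := by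
  induction l generalizing k with
  | nil => rfl
  | cons c t ih =>
    by_cases hc : c = ')'
    · subst hc
      cases k with
      | zero => simp [pvRemK, pvRem1, pvRemK_zero]
      | succ k' => simp [pvRemK, ih]
    · simp [pvRemK, pvRem1, hc, ih]

theorem pvPrefix_iff (t : List Char) : [')'].isPrefixOf t = true ↔ t.head? = some ')' := by
  cases t with
  | nil => simp [List.isPrefixOf]
  | cons d t' =>
    constructor
    · intro h
      rcases List.isPrefixOf_iff_prefix.mp h with ⟨r, hr⟩
      injection hr with h1 _
      simp [← h1]
    · intro h
      have hd : d = ')' := by simpa using h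
      subst hd
      exact List.isPrefixOf_iff_prefix.mpr ⟨t', rfl⟩

theorem pvGo_zero (s : List Char) :
    PySem.Chars.rfind.go s [')'] 0 = if s[0]? = some ')' then 0 else -1 := by
  conv_lhs => rw [PySem.Chars.rfind.go.eq_def]
  simp only []
  by_cases h : s[0]? = some ')'
  · rw [if_pos h, if_pos ((pvPrefix_iff s).mpr (by rwa [List.head?_eq_getElem?]))]
  · rw [if_neg h, if_neg (fun hp => h (by rw [← List.head?_eq_getElem?]; exact (pvPrefix_iff s).mp hp))]

theorem pvGo_succ (s : List Char) (j : Nat) :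
    PySem.Chars.rfind.go s [')'] (j + 1) =
      if s[j + 1]? = some ')' then ((j + 1 : Nat) : Int) else PySem.Chars.rfind.go s [')'] j := by
  conv_lhs => rw [PySem.Chars.rfind.go.eq_def]
  simp only []
  by_cases h : s[j + 1]? = some ')'
  · rw [if_pos h, if_pos ((pvPrefix_iff (s.drop (j + 1))).mpr (by rwa [List.head?_drop]))]
  · rw [if_neg h, if_neg (fun hp => h (by rw [← List.head?_drop]; exact (pvPrefix_iff _).mp hp))]

theorem pvGo_hit (s : List Char) (n : Nat) (h : s[n]? = some ')') :
    PySem.Chars.rfind.go s [')'] n = (n : Int) := by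
  cases n with
  | zero => rw [pvGo_zero, if_pos h]; rfl
  | succ j => rw [pvGo_succ, if_pos h]

theorem pvGo_spec (s : List Char) (n : Nat) :
    PySem.Chars.rfind.go s [')'] n = -1 ∨
      ∃ j : Nat, j ≤ n ∧ PySem.Chars.rfind.go s [')'] n = j ∧ s[j]? = some ')' := by
  induction n with
  | zero =>
    rw [pvGo_zero]
    split
    · exact Or.inr ⟨0, le_refl 0, rfl, by assumption⟩
    · exact Or.inl rfl
  | succ n ih =>
    rw [pvGo_succ]
    split
    · exact Or.inr ⟨n + 1, le_refl _, rfl, by assumption⟩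
    · rcases ih with h | ⟨j, hj, he, hc⟩
      · exact Or.inl h
      · exact Or.inr ⟨j, Nat.le_succ_of_le hj, he, hc⟩

theorem pvGo_app (m : List Char) (c : Char) (hc : c ≠ ')') (n : Nat) (hn : n ≤ m.length) :
    PySem.Chars.rfind.go (m ++ [c]) [')'] n = PySem.Chars.rfind.go m [')'] n := by
  induction n with
  | zero =>
    rw [pvGo_zero, pvGo_zero]
    rcases Nat.lt_or_ge 0 m.length with h | h
    · rw [List.getElem?_append_left h]
    · have hm : m = [] := List.eq_nil_of_length_eq_zero (Nat.le_antisymm h (Nat.zero_le _))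
      subst hm
      simp [hc]
  | succ n ih =>
    rw [pvGo_succ, pvGo_succ]
    rcases Nat.lt_or_ge (n + 1) m.length with h | h
    · rw [List.getElem?_append_left h]
      split
      · rfl
      · exact ih (Nat.le_of_lt (Nat.lt_of_succ_lt h))
    · have he : n + 1 = m.length := Nat.le_antisymm hn h
      have h1 : (m ++ [c])[n + 1]? = some c := by
        rw [List.getElem?_append_right (le_of_eq he.symm)]
        simp [he]
      have h2 : m[n + 1]? = none := by
        rw [List.getElem?_eq_none]
        omega
      rw [h1, h2]
      have hnc : ¬ (some c = some ')') := by simp [hc]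
      rw [if_neg hnc, if_neg (by simp)]
      exact ih (by omega)

theorem pvStepA_snoc_close (m : List Char) : pvStepA (m ++ [')']) = m := by
  have hi : PySem.Chars.rfind (m ++ [')']) [')'] = (m.length : Int) := by
    unfold PySem.Chars.rfind
    rw [show (m ++ [')']).length = m.length + 1 by simp]
    rw [pvGo_succ]
    rw [show (m ++ [')'])[m.length + 1]? = none by simp]
    rw [if_neg (by simp)]
    exact pvGo_hit _ _ (by simp)
  unfold pvStepA
  rw [hi, if_pos (by omega)]
  simp only [PySem.Chars.slice_eq_listSlice]
  rw [PySem.List.slice_to_natCast]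
  rw [show ((m.length : Int) + 1) = ((m.length + 1 : Nat) : Int) by push_cast; ring]
  rw [PySem.List.slice_from_natCast]
  simp

theorem pvStepA_snoc_other (m : List Char) (c : Char) (hc : c ≠ ')') :
    pvStepA (m ++ [c]) = pvStepA m ++ [c] := by
  have hi : PySem.Chars.rfind (m ++ [c]) [')'] = PySem.Chars.rfind m [')'] := by
    unfold PySem.Chars.rfind
    rw [show (m ++ [c]).length = m.length + 1 by simp]
    rw [pvGo_succ]
    rw [show (m ++ [c])[m.length + 1]? = none by simp]
    rw [if_neg (by simp)]
    exact pvGo_app m c hc m.length (le_refl _)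
  rcases pvGo_spec m m.length with h | ⟨j, hj, he, hcj⟩
  · have hm : PySem.Chars.rfind m [')'] = -1 := h
    unfold pvStepA
    rw [hi, hm]
    simp
  · have hm : PySem.Chars.rfind m [')'] = (j : Int) := he
    have hjlt : j < m.length := by
      by_contra hge
      rw [List.getElem?_eq_none (by omega)] at hcj
      simp at hcj
    unfold pvStepA
    rw [hi, hm, if_pos (by omega), if_pos (by omega)]
    simp only [PySem.Chars.slice_eq_listSlice]
    rw [PySem.List.slice_to_natCast, PySem.List.slice_to_natCast]
    rw [show ((j : Int) + 1) = ((j + 1 : Nat) : Int) by push_cast; ring]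
    rw [PySem.List.slice_from_natCast, PySem.List.slice_from_natCast]
    rw [List.take_append_of_le_length (by omega), List.drop_append_of_le_length (by omega)]
    simp

theorem pvStepA_rev (r : List Char) : pvStepA r.reverse = (pvRem1 r).reverse := by
  induction r with
  | nil => rfl
  | cons c t ih =>
    by_cases hc : c = ')'
    · subst hc
      simp only [List.reverse_cons]
      rw [pvStepA_snoc_close]
      simp [pvRem1]
    · simp only [List.reverse_cons, pvRem1, if_neg hc]
      rw [pvStepA_snoc_other _ _ hc, ih]

theorem pvFoldl_step (k : Nat) (cs : List Char) :
    (List.range k).foldl (fun l _ => pvStepA l) cs = (pvRemK k cs.reverse).reverse := by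
  induction k with
  | zero => simp [pvRemK_zero]
  | succ k ih =>
    rw [List.range_succ, List.foldl_append, ih]
    simp only [List.foldl_cons, List.foldl_nil]
    rw [pvRemK_succ, ← pvStepA_rev]

-- ===== VERDICT (by name: the statement is the Claim_ definition above) =====
theorem fix_parenthesis_balance_py_spec : Claim_equal_fix_parenthesis_balance_py := by
  intro line _
  unfold Spec_fix_parenthesis_balance_py fix_parenthesis_balance_py fix_parenthesis_balance_py_alt
  simp only []
  split_ifs
  · rfl
  · rw [pvFoldl_step]
  · rfl
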